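-- pv_equiv track=rewrite | github.com/AugustDanell/Kattis-Assignments | Python/gettowork.py | minimizeDrivers
-- ===== SOURCE A (Python) =====
-- def minimizeDrivers(town, employeeMap):
--     if town not in employeeMap:
--         return 0
--
--     employees = employeeMap[town]
--     sortedEmployees = list(sorted(employees, key= lambda x: x[1], reverse=True))
--     acc = 0
--     for i in range(len(sortedEmployees)):
--         employee = sortedEmployees[i]
--         acc += employee[1]
--         if acc >= len(sortedEmployees):
--             return i+1
--     return -1
-- ===== SOURCE B (Python) =====
-- def minimizeDrivers(town, employeeMap):
--     if town not in employeeMap: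
--         return 0
--     caps = [e[1] for e in employeeMap[town]]
--     need = len(caps)
--     acc = 0
--     k = 0
--     while caps:
--         m = max(caps)
--         caps.remove(m)
--         acc += m
--         k += 1
--         if acc >= need:
--             return k
--     return -1
-- ===== Notes on version B (the rewrite author's own statement) =====
-- stated objective: alternative
-- what changed: B replaces sort-the-whole-list-then-scan by repeated extraction of the current maximum capacity (selection-style priority extraction on the bare capacity list), stopping as soon as the running sum covers the employee count.
import Mathlib
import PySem

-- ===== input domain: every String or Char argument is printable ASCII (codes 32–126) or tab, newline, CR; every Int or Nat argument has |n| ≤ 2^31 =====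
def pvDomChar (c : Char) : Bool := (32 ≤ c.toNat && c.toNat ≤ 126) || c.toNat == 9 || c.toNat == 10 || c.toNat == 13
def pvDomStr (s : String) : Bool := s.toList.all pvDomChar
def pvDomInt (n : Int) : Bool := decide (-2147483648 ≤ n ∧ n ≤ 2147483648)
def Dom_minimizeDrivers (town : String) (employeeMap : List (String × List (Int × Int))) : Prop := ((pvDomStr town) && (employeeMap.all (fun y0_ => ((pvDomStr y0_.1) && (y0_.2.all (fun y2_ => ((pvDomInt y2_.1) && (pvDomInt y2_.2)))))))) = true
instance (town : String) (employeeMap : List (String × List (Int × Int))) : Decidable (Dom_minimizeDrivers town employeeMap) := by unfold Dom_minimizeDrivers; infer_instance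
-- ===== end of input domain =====

-- B replaces sort-then-scan by repeated extraction of the current maximum capacity; equal counts, no speed claim.

-- ===== PORT A =====
-- the for-loop of A over the sorted list: acc += e[1]; if acc >= n: return i+1; else continue
def pvALoop (xs : List (Int × Int)) (n : Int) (acc : Int) (i : Int) : Int :=
  match xs with
  | [] => -1
  | e :: rest =>
    let acc2 := acc + e.2
    if acc2 ≥ n then i + 1 else pvALoop rest n acc2 (i + 1)

def minimizeDrivers (town : String) (employeeMap : List (String × List (Int × Int))) : Int :=
  match PySem.Dict.get? (PySem.Dict.mk employeeMap) town with
  | none => 0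
  | some employees =>
    let sortedEmployees := PySem.List.sorted employees (fun x => x.2) true
    pvALoop sortedEmployees (sortedEmployees.length : Int) 0 0

-- ===== PORT B =====
-- while caps: m = max(caps); caps.remove(m); acc += m; k += 1; if acc >= need: return k
def pvBLoop (caps : List Int) (need : Int) (acc : Int) (k : Int) : Int :=
  match hm : PySem.List.max? caps (fun y => y) with
  | none => -1
  | some m =>
    match hr : PySem.List.remove? caps m with
    | none => -1   -- unreachable: the maximum is a member
    | some rest =>
      if acc + m ≥ need then k + 1 else pvBLoop rest need (acc + m) (k + 1)
termination_by caps.length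
decreasing_by
  have hmem : m ∈ caps := PySem.List.max?_mem hm
  have := PySem.List.remove?_eq_some_erase caps m hmem
  rw [this] at hr
  cases hr
  have hlen := List.length_erase_of_mem hmem
  have : 0 < caps.length := List.length_pos_of_mem hmem
  omega

def minimizeDrivers_alt (town : String) (employeeMap : List (String × List (Int × Int))) : Int :=
  match PySem.Dict.get? (PySem.Dict.mk employeeMap) town with
  | none => 0
  | some employees =>
    let caps := employees.map (fun e => e.2)
    pvBLoop caps (caps.length : Int) 0 0

-- ===== PRECONDITION & SPEC =====
def Spec_minimizeDrivers (town : String) (employeeMap : List (String × List (Int × Int))) (out : Int) : Prop := out = minimizeDrivers_alt town employeeMap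
instance (town : String) (employeeMap : List (String × List (Int × Int))) (out : Int) : Decidable (Spec_minimizeDrivers town employeeMap out) := by unfold Spec_minimizeDrivers; infer_instance

-- ===== CLAIM (what is proved, stated in full; the proofs are below) =====
def Claim_equal_minimizeDrivers : Prop := ∀ (town : String) (employeeMap : List (String × List (Int × Int))), Dom_minimizeDrivers town employeeMap → Spec_minimizeDrivers town employeeMap (minimizeDrivers town employeeMap)

-- ===== LEMMAS AND PROOFS =====

-- the common scan over a plain capacity list
def pvCapScan (cs : List Int) (n : Int) (acc : Int) (i : Int) : Int :=
  match cs with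
  | [] => -1
  | c :: rest => if acc + c ≥ n then i + 1 else pvCapScan rest n (acc + c) (i + 1)

theorem pvALoop_eq_capScan (xs : List (Int × Int)) (n acc i : Int) :
    pvALoop xs n acc i = pvCapScan (xs.map (fun e => e.2)) n acc i := by
  induction xs generalizing acc i with
  | nil => rfl
  | cons e rest ih => simp [pvALoop, pvCapScan, ih]

theorem pvBLoop_eq_capScan (d l : List Int) (hperm : l.Perm d)
    (hsort : d.Pairwise (fun a b => b ≤ a)) (n acc k : Int) :
    pvBLoop l n acc k = pvCapScan d n acc k := by
  induction d generalizing l acc k with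
  | nil =>
    have hl : l = [] := List.Perm.eq_nil hperm
    subst hl
    rw [pvBLoop]
    rfl
  | cons x t ih =>
    have hlne : l ≠ [] := by
      intro h; subst h; have := List.Perm.nil_eq hperm; simp at this
    obtain ⟨m, hm⟩ : ∃ m, PySem.List.max? l (fun y => y) = some m := by
      cases h : PySem.List.max? l (fun y => y) with
      | none => exact absurd ((PySem.List.max?_eq_none_iff l (fun y => y)).mp h) hlne
      | some m => exact ⟨m, rfl⟩
    have hmemL : m ∈ l := PySem.List.max?_mem hm
    have hmax : ∀ y ∈ l, y ≤ m := by
      intro y hy; simpa using PySem.List.max?_isMax hm y hy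
    -- the head of the descending list equals the maximum value
    have hxd : ∀ y ∈ t, y ≤ x := (List.pairwise_cons.mp hsort).1
    have hxl : x ∈ l := hperm.mem_iff.mpr (by simp)
    have hmd : m ∈ x :: t := hperm.mem_iff.mp hmemL
    have hxm : x = m := by
      have h1 : x ≤ m := hmax x hxl
      have h2 : m ≤ x := by
        rcases List.mem_cons.mp hmd with h | h
        · simp_all
        · exact hxd m h
      omega
    have hrem : PySem.List.remove? l m = some (l.erase m) :=
      PySem.List.remove?_eq_some_erase l m hmemL
    have hperm' : (l.erase m).Perm t := by
      have := hperm.erase m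
      rwa [hxm, List.erase_cons_head] at this
    have hstep : pvBLoop l n acc k =
        (if acc + m ≥ n then k + 1 else pvBLoop (l.erase m) n (acc + m) (k + 1)) := by
      rw [pvBLoop]
      split
      · next h => rw [h] at hm; exact absurd hm (by simp)
      · next m' hm' =>
        rw [hm'] at hm; injection hm with hmm; subst hmm
        split
        · next h => rw [hrem] at h; exact absurd h (by simp)
        · next rest hr =>
          rw [hrem] at hr; injection hr with hrr; subst hrr; rfl
    rw [hstep, pvCapScan, hxm]
    by_cases hc : acc + m ≥ n
    · simp [hc]
    · simp only [if_neg hc]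
      exact ih (l.erase m) hperm' (List.pairwise_cons.mp hsort).2 (acc + m) (k + 1)

-- ===== VERDICT (by name: the statement is the Claim_ definition above) =====
theorem minimizeDrivers_spec : Claim_equal_minimizeDrivers := by
  intro town employeeMap _
  unfold Spec_minimizeDrivers minimizeDrivers minimizeDrivers_alt
  cases hget : PySem.Dict.get? (PySem.Dict.mk employeeMap) town with
  | none => rfl
  | some employees =>
    simp only []
    set s := PySem.List.sorted employees (fun x => x.2) true with hs
    have hperm : (employees.map (fun e => e.2)).Perm (s.map (fun e => e.2)) :=
      (List.Perm.map _ (PySem.List.sorted_perm employees (fun x => x.2) true)).symm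
    have hsort : (s.map (fun e => e.2)).Pairwise (fun a b => b ≤ a) := by
      rw [List.pairwise_map]
      exact PySem.List.sorted_pairwise_rev employees (fun x => x.2)
    have hlen : (s.length : Int) = ((employees.map (fun e => e.2)).length : Int) := by
      simp [hs, PySem.List.length_sorted]
    rw [pvALoop_eq_capScan, hlen,
        pvBLoop_eq_capScan (s.map (fun e => e.2)) (employees.map (fun e => e.2)) hperm hsort]
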